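-- pv_equiv track=rewrite | github.com/KDahlgren/iapyx | src/dedt/dedt.py | isMath
-- ===== SOURCE A (Python) =====
-- aggOps   = [ "min", "max", "sum", "count", "avg" ]
--
-- arithOps = [ "+", "-", "/", "*" ]
--
-- def isMath( gattName ) :
--
--   # check for aggregate operators
--   for op in aggOps :
--     if gattName.startswith( op+"<" ) and gattName.endswith( ">" ) :
--       return True
--
--   # check for arithmetic operators
--   for op in arithOps :
--     if op in gattName :
--       return True
--
--   return False
-- ===== SOURCE B (Python) =====
-- AGG_NAMES = {"min", "max", "sum", "count", "avg"}
-- ARITH_CHARS = {"+", "-", "/", "*"}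
--
-- def isMath(gattName):
--     if gattName.endswith(">") and "<" in gattName:
--         if gattName[:gattName.index("<")] in AGG_NAMES:
--             return True
--     return any(c in ARITH_CHARS for c in gattName)
-- ===== Notes on version B (the rewrite author's own statement) =====
-- stated objective: idiomatic
-- what changed: The per-operator startswith loop is replaced by extracting the prefix before the first '<' once and testing set membership, and the per-operator substring loop by a single character scan against a set.
import Mathlib
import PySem

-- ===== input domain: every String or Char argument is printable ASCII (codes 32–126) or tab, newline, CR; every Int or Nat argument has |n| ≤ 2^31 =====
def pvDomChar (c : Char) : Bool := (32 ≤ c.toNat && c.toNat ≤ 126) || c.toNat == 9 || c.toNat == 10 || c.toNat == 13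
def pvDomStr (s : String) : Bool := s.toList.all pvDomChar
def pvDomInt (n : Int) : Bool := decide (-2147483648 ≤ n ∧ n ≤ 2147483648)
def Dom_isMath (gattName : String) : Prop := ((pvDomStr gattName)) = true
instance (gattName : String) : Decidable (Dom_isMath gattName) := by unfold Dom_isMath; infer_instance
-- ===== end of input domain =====

-- B replaces A's per-operator startswith/substring loops by one prefix extraction
-- before the first '<' plus a single character scan (objective: idiomatic).


-- ===== PORT A =====
-- aggOps = [ "min", "max", "sum", "count", "avg" ]
def aggOpsA : List (List Char) :=
  [['m','i','n'], ['m','a','x'], ['s','u','m'], ['c','o','u','n','t'], ['a','v','g']]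

-- arithOps = [ "+", "-", "/", "*" ]
def arithOpsA : List (List Char) := [['+'], ['-'], ['/'], ['*']]

-- for op in aggOps: if gattName.startswith(op+"<") and gattName.endswith(">"): return True
def aggLoopA (cs : List Char) : List (List Char) → Bool
  | [] => false
  | op :: rest =>
    if PySem.Chars.startswith cs (op ++ ['<']) && PySem.Chars.endswith cs ['>'] then true
    else aggLoopA cs rest

-- for op in arithOps: if op in gattName: return True
def arithLoopA (cs : List Char) : List (List Char) → Bool
  | [] => false
  | op :: rest => if PySem.Chars.isIn op cs then true else arithLoopA cs rest

def isMath (gattName : String) : Bool :=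
  let cs := gattName.toList
  if aggLoopA cs aggOpsA then true else arithLoopA cs arithOpsA

-- ===== PORT B =====
-- AGG_NAMES = {"min", "max", "sum", "count", "avg"}  (a set of 5 distinct names)
def aggNamesB : List (List Char) :=
  [['m','i','n'], ['m','a','x'], ['s','u','m'], ['c','o','u','n','t'], ['a','v','g']]

-- if gattName.endswith(">") and "<" in gattName:
--   if gattName[:gattName.index("<")] in AGG_NAMES: return True
-- return any(c in ARITH_CHARS for c in gattName)
def isMath_alt (gattName : String) : Bool :=
  let cs := gattName.toList
  (PySem.Chars.endswith cs ['>'] && PySem.Chars.isIn ['<'] cs &&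
     aggNamesB.contains (PySem.List.slice cs none (some (PySem.Chars.find cs ['<'])))) ||
  cs.any (fun c => ['+', '-', '/', '*'].contains c)

-- ===== PRECONDITION & SPEC =====
def Spec_isMath (gattName : String) (out : Bool) : Prop := out = isMath_alt gattName
instance (gattName : String) (out : Bool) : Decidable (Spec_isMath gattName out) := by unfold Spec_isMath; infer_instance

-- ===== CLAIM (what is proved, stated in full; the proofs are below) =====
def Claim_equal_isMath : Prop := ∀ (gattName : String), Dom_isMath gattName → Spec_isMath gattName (isMath gattName)

-- ===== LEMMAS AND PROOFS =====

-- "op in s" for a one-character op is exactly membership of that character.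
lemma isIn_singleton (c : Char) (cs : List Char) :
    PySem.Chars.isIn [c] cs = cs.contains c := by
  rw [Bool.eq_iff_iff]
  simp [PySem.Chars.isIn_iff_infix, List.singleton_infix_iff]

-- The first occurrence of '<' in pre ++ '<' :: suf with '<' ∉ pre is at pre.length.
lemma find_lt_append (pre suf : List Char) (hpre : '<' ∉ pre) :
    PySem.Chars.find (pre ++ '<' :: suf) ['<'] = (pre.length : Int) := by
  set cs := pre ++ '<' :: suf with hcs
  have hmem : '<' ∈ cs := by simp [hcs]
  have hnn : 0 ≤ PySem.Chars.find cs ['<'] := by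
    rw [PySem.Chars.find_nonneg_iff, List.singleton_infix_iff]; exact hmem
  obtain ⟨h1, h2⟩ := PySem.Chars.find_spec (s := cs) (sub := ['<']) hnn
  set f := (PySem.Chars.find cs ['<']).toNat with hf
  have hfeq : f = pre.length := by
    rcases Nat.lt_trichotomy f pre.length with h | h | h
    · exfalso
      obtain ⟨t, ht⟩ := h1
      have hget : cs[f]? = some '<' := by
        have : cs.drop f = '<' :: t := by simpa using ht.symm
        rw [← List.head?_drop, this]; rfl
      have : pre[f]? = some '<' := by
        rwa [hcs, List.getElem?_append_left h] at hget
      exact hpre (List.mem_of_getElem? this)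
    · exact h
    · exfalso
      exact h2 pre.length h ⟨suf, by simp [hcs]⟩
  omega

-- A's aggregate test "startswith(op+'<')" for an op without '<' equals B's
-- "'<' in s and s[:s.index('<')] == op".
lemma startswith_agg (cs op : List Char) (hop : '<' ∉ op) :
    PySem.Chars.startswith cs (op ++ ['<'])
      = (PySem.Chars.isIn ['<'] cs &&
          decide (cs.take (PySem.Chars.find cs ['<']).toNat = op)) := by
  rw [Bool.eq_iff_iff]
  simp only [PySem.Chars.startswith_iff, Bool.and_eq_true, decide_eq_true_iff,
    isIn_singleton, List.contains_eq_mem, decide_eq_true_iff]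
  constructor
  · rintro ⟨t, ht⟩
    have hcs : cs = op ++ '<' :: t := by simpa using ht.symm
    have hfind := find_lt_append op t hop
    rw [← hcs] at hfind
    refine ⟨by simp [hcs], ?_⟩
    rw [hfind]
    simp [hcs]
  · rintro ⟨hmem, htake⟩
    have hnn : 0 ≤ PySem.Chars.find cs ['<'] := by
      rw [PySem.Chars.find_nonneg_iff, List.singleton_infix_iff]; exact hmem
    obtain ⟨h1, -⟩ := PySem.Chars.find_spec (s := cs) (sub := ['<']) hnn
    obtain ⟨t, ht⟩ := h1
    refine ⟨t, ?_⟩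
    have : cs = cs.take (PySem.Chars.find cs ['<']).toNat ++ '<' :: t := by
      conv_lhs => rw [← List.take_append_drop (PySem.Chars.find cs ['<']).toNat cs]
      congr 1
      simpa using ht.symm
    rw [htake] at this
    simpa using this.symm

theorem isMath_eq_alt (g : String) : isMath g = isMath_alt g := by
  unfold isMath isMath_alt
  simp only []
  set cs := g.toList with hcsdef
  have harith : arithLoopA cs arithOpsA = cs.any (fun c => ['+', '-', '/', '*'].contains c) := by
    rw [Bool.eq_iff_iff]
    simp [arithLoopA, arithOpsA, isIn_singleton, List.any_eq_true]
    aesop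
  have h1 := startswith_agg cs ['m','i','n'] (by decide)
  have h2 := startswith_agg cs ['m','a','x'] (by decide)
  have h3 := startswith_agg cs ['s','u','m'] (by decide)
  have h4 := startswith_agg cs ['c','o','u','n','t'] (by decide)
  have h5 := startswith_agg cs ['a','v','g'] (by decide)
  simp only [List.cons_append, List.nil_append] at h1 h2 h3 h4 h5
  cases hI : PySem.Chars.isIn ['<'] cs with
  | false =>
    rw [hI] at h1 h2 h3 h4 h5
    simp only [Bool.false_and] at h1 h2 h3 h4 h5
    have hagg : aggLoopA cs aggOpsA = false := by
      simp [aggLoopA, aggOpsA, h1, h2, h3, h4, h5]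
    simp [hagg, harith]
  | true =>
    rw [hI] at h1 h2 h3 h4 h5
    simp only [Bool.true_and] at h1 h2 h3 h4 h5
    have hnn : 0 ≤ PySem.Chars.find cs ['<'] := by
      rw [PySem.Chars.find_nonneg_iff, ← PySem.Chars.isIn_iff_infix, hI]
    have hslice : PySem.List.slice cs none (some (PySem.Chars.find cs ['<']))
        = cs.take (PySem.Chars.find cs ['<']).toNat := PySem.List.slice_to cs hnn
    have hagg : aggLoopA cs aggOpsA
        = (PySem.Chars.endswith cs ['>'] &&
            aggNamesB.contains (cs.take (PySem.Chars.find cs ['<']).toNat)) := by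
      rw [Bool.eq_iff_iff]
      simp [aggLoopA, aggOpsA, aggNamesB, h1, h2, h3, h4, h5]
      tauto
    rw [hslice, hagg, harith]
    cases hE : PySem.Chars.endswith cs ['>'] <;>
      cases hC : aggNamesB.contains (cs.take (PySem.Chars.find cs ['<']).toNat) <;>
        simp

-- ===== VERDICT (by name: the statement is the Claim_ definition above) =====
theorem isMath_spec : Claim_equal_isMath := by
  intro g _
  unfold Spec_isMath
  exact isMath_eq_alt g
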